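-- pv_equiv track=rewrite | github.com/jcbale22/LooPi | app/services/device_service.py | get_assigned_devices_by_playlist
-- ===== SOURCE A (Python) =====
-- def get_assigned_devices_by_playlist(devices: dict):
--     """
--     Create a mapping of playlists → list of device names assigned to that playlist.
--     Useful for rendering on the playlists UI.
--     Example return:
--       {
--         "Cornerstone Sanctuary": ["Lobby TV", "Welcome Kiosk"],
--         "Kids Wing": ["Check-in Station 1"]
--       }
--     """
--     assigned = {}
--     for device_id, device in devices.items():
--         playlist = device.get("active_playlist")
--         name = device.get("name", device_id)  # fallback to ID if name missing
--         if playlist: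
--             assigned.setdefault(playlist, []).append(name)
--     return assigned
-- ===== SOURCE B (Python) =====
-- def get_assigned_devices_by_playlist(devices: dict):
--     # Two-pass: flatten to (playlist, name) pairs, collect playlists in
--     # first-encounter order, then gather each playlist's names by a scan.
--     pairs = [(d.get("active_playlist", ""), d.get("name", device_id))
--              for device_id, d in devices.items()]
--     playlists = []
--     for p, _ in pairs:
--         if p and p not in playlists:
--             playlists.append(p)
--     return {p: [n for q, n in pairs if q == p] for p in playlists}
-- ===== Notes on version B (the rewrite author's own statement) =====
-- stated objective: alternative
-- what changed: Replaces the one-pass setdefault-bucketing dict build with a two-pass decomposition: flatten devices to (playlist, name) pairs, collect the distinct truthy playlists in first-encounter order, then gather each playlist's names with a comprehension scan.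
import Mathlib
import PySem

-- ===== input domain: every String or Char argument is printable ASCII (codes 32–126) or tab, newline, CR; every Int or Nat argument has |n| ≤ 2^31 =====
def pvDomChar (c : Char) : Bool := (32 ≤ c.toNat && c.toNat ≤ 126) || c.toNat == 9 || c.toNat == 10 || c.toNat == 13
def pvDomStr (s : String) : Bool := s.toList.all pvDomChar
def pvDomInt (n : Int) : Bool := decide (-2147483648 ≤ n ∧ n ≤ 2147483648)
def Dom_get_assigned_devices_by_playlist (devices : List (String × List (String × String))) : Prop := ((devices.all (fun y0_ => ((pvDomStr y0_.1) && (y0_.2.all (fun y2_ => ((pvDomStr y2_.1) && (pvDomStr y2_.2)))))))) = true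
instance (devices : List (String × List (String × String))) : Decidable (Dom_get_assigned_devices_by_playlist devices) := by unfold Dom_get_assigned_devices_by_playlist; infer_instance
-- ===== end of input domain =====

-- B replaces A's one-pass setdefault bucketing by a two-pass decomposition
-- (flatten to (playlist, name) pairs, dedup the truthy playlists, gather names
-- per playlist by a scan); same return value, no speed claim.


-- ===== PORT A =====
def get_assigned_devices_by_playlist (devices : List (String × List (String × String))) : List (String × List String) :=
  (devices.foldl (fun assigned x =>
      let playlist := PySem.Dict.get? (PySem.Dict.mk x.2) "active_playlist"
      let name := PySem.Dict.getD (PySem.Dict.mk x.2) "name" x.1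
      match playlist with
      | some p => if p ≠ "" then PySem.Dict.modify assigned p [] (· ++ [name]) else assigned
      | none => assigned)
    (PySem.Dict.empty : PySem.Dict String (List String))).items

-- ===== PORT B =====
def get_assigned_devices_by_playlist_alt (devices : List (String × List (String × String))) : List (String × List String) :=
  let pairs := devices.map (fun x => (PySem.Dict.getD (PySem.Dict.mk x.2) "active_playlist" "", PySem.Dict.getD (PySem.Dict.mk x.2) "name" x.1))
  let playlists := pairs.foldl (fun acc q => if q.1 ≠ "" ∧ ¬ acc.contains q.1 then acc ++ [q.1] else acc) ([] : List String)
  playlists.map (fun p => (p, (pairs.filter (fun q => q.1 == p)).map (fun q => q.2)))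

-- ===== PRECONDITION & SPEC =====
def Spec_get_assigned_devices_by_playlist (devices : List (String × List (String × String))) (out : List (String × List String)) : Prop := out = get_assigned_devices_by_playlist_alt devices
instance (devices : List (String × List (String × String))) (out : List (String × List String)) : Decidable (Spec_get_assigned_devices_by_playlist devices out) := by unfold Spec_get_assigned_devices_by_playlist; infer_instance

-- ===== CLAIM (what is proved, stated in full; the proofs are below) =====
def Claim_equal_get_assigned_devices_by_playlist : Prop := ∀ (devices : List (String × List (String × String))), Dom_get_assigned_devices_by_playlist devices → Spec_get_assigned_devices_by_playlist devices (get_assigned_devices_by_playlist devices)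

-- ===== LEMMAS AND PROOFS =====

-- the flattened (playlist, name) pairs, playlist "" standing for a missing/falsy one
def pvPairs (devices : List (String × List (String × String))) : List (String × String) :=
  devices.map (fun x => (PySem.Dict.getD (PySem.Dict.mk x.2) "active_playlist" "", PySem.Dict.getD (PySem.Dict.mk x.2) "name" x.1))

-- the pairs A actually buckets: those with a truthy playlist
def pvPairsA (devices : List (String × List (String × String))) : List (String × String) :=
  (pvPairs devices).filter (fun q => q.1 != "")

lemma pvFoldA_eq (devices : List (String × List (String × String)))
    (d : PySem.Dict String (List String)) :
    devices.foldl (fun assigned x =>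
      let playlist := PySem.Dict.get? (PySem.Dict.mk x.2) "active_playlist"
      let name := PySem.Dict.getD (PySem.Dict.mk x.2) "name" x.1
      match playlist with
      | some p => if p ≠ "" then PySem.Dict.modify assigned p [] (· ++ [name]) else assigned
      | none => assigned) d
    = (pvPairsA devices).foldl (fun d p => d.modify p.1 [] (· ++ [p.2])) d := by
  induction devices generalizing d with
  | nil => rfl
  | cons x xs ih =>
    simp only [List.foldl_cons, pvPairsA, pvPairs, List.map_cons, List.filter_cons]
    rw [PySem.Dict.getD_eq_get?_getD (d := PySem.Dict.mk x.2) (k := "active_playlist") (d0 := "")]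
    cases h : PySem.Dict.get? (PySem.Dict.mk x.2) "active_playlist" with
    | none =>
      simp only [Option.getD_none, bne_self_eq_false]
      exact ih d
    | some p =>
      by_cases hp : p = ""
      · subst hp
        simp only [Option.getD_some, bne_self_eq_false, ne_eq, not_true_eq_false,
          Bool.false_eq_true, if_false]
        exact ih d
      · simp only [Option.getD_some, ne_eq, hp, not_false_eq_true, if_pos,
          bne_iff_ne]
        exact ih _

lemma pvPlaylists_eq (ps : List (String × String)) (acc : PySem.Set String) :
    ps.foldl (fun acc q => if q.1 ≠ "" ∧ ¬ acc.contains q.1 then acc ++ [q.1] else acc) acc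
    = PySem.Set.update acc ((ps.filter (fun q => q.1 != "")).map Prod.fst) := by
  induction ps generalizing acc with
  | nil => rfl
  | cons q ps ih =>
    simp only [List.foldl_cons, List.filter_cons]
    by_cases hq : q.1 = ""
    · simp only [hq, ne_eq, not_true_eq_false, false_and, bne_self_eq_false,
        Bool.false_eq_true, if_false]
      exact ih acc
    · simp only [ne_eq, hq, not_false_eq_true, true_and, bne_iff_ne, if_pos,
        List.map_cons, PySem.Set.update_cons]
      by_cases hc : acc.contains q.1
      · have hm : q.1 ∈ acc := List.mem_of_elem_eq_true (by simpa using hc)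
        rw [if_neg (by simp [hm]), PySem.Set.add_of_mem hm]
        exact ih acc
      · rw [if_pos (by simp_all), PySem.Set.add_of_not_mem (by simpa using hc)]
        exact ih _

lemma pvPairs_eq (devices : List (String × List (String × String))) :
    devices.map (fun x => (PySem.Dict.getD (PySem.Dict.mk x.2) "active_playlist" "", PySem.Dict.getD (PySem.Dict.mk x.2) "name" x.1)) = pvPairs devices := rfl

lemma pvFilter_eq (ps : List (String × String)) (p : String) (hp : p ≠ "") :
    ps.filter (fun q => q.1 == p)
    = (ps.filter (fun q => q.1 != "")).filter (fun q => q.1 == p) := by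
  rw [List.filter_filter]
  apply List.filter_congr
  intro q _
  by_cases h : q.1 = p
  · simp [h, hp]
  · simp [h]

-- ===== VERDICT (by name: the statement is the Claim_ definition above) =====
theorem get_assigned_devices_by_playlist_spec : Claim_equal_get_assigned_devices_by_playlist := by
  intro devices _
  show get_assigned_devices_by_playlist devices = get_assigned_devices_by_playlist_alt devices
  unfold get_assigned_devices_by_playlist
  simp only [get_assigned_devices_by_playlist_alt]
  rw [pvFoldA_eq, pvPairs_eq, pvPlaylists_eq]
  have hnd : ((pvPairsA devices).foldl (fun d p => d.modify p.1 [] (· ++ [p.2])) (PySem.Dict.empty : PySem.Dict String (List String))).keys.Nodup :=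
    PySem.Dict.nodup_keys_foldl_modify_key (pvPairsA devices) Prod.fst [] (fun _ p v => v ++ [p.2]) PySem.Dict.empty (by simp [PySem.Dict.keys_empty])
  have hkeys : ((pvPairsA devices).foldl (fun d p => d.modify p.1 [] (· ++ [p.2])) (PySem.Dict.empty : PySem.Dict String (List String))).keys = PySem.Set.ofList ((pvPairsA devices).map Prod.fst) := by
    have h := PySem.Dict.keys_foldl_modify_key (pvPairsA devices) Prod.fst ([] : List String) (fun _ p v => v ++ [p.2]) PySem.Dict.empty
    simpa [PySem.Dict.keys_empty, PySem.Set.update_nil_left] using h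
  rw [PySem.Dict.items_eq_map_keys _ hnd [], hkeys]
  rw [show ((pvPairs devices).filter (fun q => q.1 != "")).map Prod.fst = (pvPairsA devices).map Prod.fst from rfl]
  apply List.map_congr_left
  intro p hp
  have hpne : p ≠ "" := by
    rw [PySem.Set.mem_ofList] at hp
    obtain ⟨q, hq, rfl⟩ := List.mem_map.mp hp
    have := List.of_mem_filter hq
    simpa [bne_iff_ne] using this
  rw [PySem.Dict.getD_foldl_modify_append, PySem.Dict.getD_empty, List.nil_append]
  rw [pvFilter_eq (pvPairs devices) p hpne]
  rfl
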